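-- pv_equiv track=rewrite | github.com/Abenuterefe/CSEC_CPD | Vanya and Fence.py | min_road_width
-- ===== SOURCE A (Python) =====
-- def min_road_width(n, h, heights):
--     width = 0
--     for height in heights:
--         if height > h:
--             width += 2
--         else:
--             width += 1
--     return width
-- ===== SOURCE B (Python) =====
-- def min_road_width(n, h, heights):
--     # Sort the heights, then binary-search (bisect_right) for the boundary
--     # between fences of height <= h and the taller ones; every fence takes
--     # width 1 and each of the len - cut tall fences takes 1 extra.
--     hs = sorted(heights)
--     lo, hi = 0, len(hs)
--     while lo < hi:
--         mid = (lo + hi) // 2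
--         if hs[mid] <= h:
--             lo = mid + 1
--         else:
--             hi = mid
--     return len(hs) + (len(hs) - lo)
-- ===== Notes on version B (the rewrite author's own statement) =====
-- stated objective: alternative
-- what changed: B sorts the heights and finds the tall/short boundary by a hand-written bisect_right binary search, returning len + (len - cut), instead of A's single accumulator pass adding 1 or 2 per fence.
import Mathlib
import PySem

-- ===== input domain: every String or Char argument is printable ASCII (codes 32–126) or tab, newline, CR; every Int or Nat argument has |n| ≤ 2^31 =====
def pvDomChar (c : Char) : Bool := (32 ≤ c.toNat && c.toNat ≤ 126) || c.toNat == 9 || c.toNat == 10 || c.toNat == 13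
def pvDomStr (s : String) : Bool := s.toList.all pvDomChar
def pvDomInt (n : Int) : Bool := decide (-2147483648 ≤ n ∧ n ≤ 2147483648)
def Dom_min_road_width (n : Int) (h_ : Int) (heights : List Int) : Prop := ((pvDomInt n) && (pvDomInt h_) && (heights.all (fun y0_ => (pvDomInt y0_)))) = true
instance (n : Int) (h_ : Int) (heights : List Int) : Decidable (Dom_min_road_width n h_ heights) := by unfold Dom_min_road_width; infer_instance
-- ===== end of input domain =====

-- B replaces A's 1/2 accumulator pass by sort + binary search for the tall/short
-- boundary (objective: alternative decomposition, not faster).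

-- ===== PORT A =====
def min_road_width (n : Int) (h_ : Int) (heights : List Int) : Int :=
  heights.foldl (fun width height => if height > h_ then width + 2 else width + 1) 0

-- ===== PORT B =====
-- the while loop of Source B; hs[mid] is always in range (0 ≤ lo ≤ mid < hi ≤ len),
-- so pyGetD with default 0 is exact here
def pvBisect (hs : List Int) (h_ : Int) (lo hi : Int) : Int :=
  if hlt : lo < hi then
    let mid := PySem.Int.floordiv (lo + hi) 2
    if PySem.List.pyGetD hs mid 0 ≤ h_ then pvBisect hs h_ (mid + 1) hi
    else pvBisect hs h_ lo mid
  else lo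
termination_by (hi - lo).toNat
decreasing_by
  all_goals
    simp only [PySem.Int.floordiv_eq_ediv_of_pos (by norm_num : (0:Int) < 2)]
    omega

def min_road_width_alt (n : Int) (h_ : Int) (heights : List Int) : Int :=
  let hs := PySem.List.sorted heights (fun x => x) false
  let lo := pvBisect hs h_ 0 (hs.length : Int)
  (hs.length : Int) + ((hs.length : Int) - lo)

-- ===== PRECONDITION & SPEC =====
def Spec_min_road_width (n : Int) (h_ : Int) (heights : List Int) (out : Int) : Prop := out = min_road_width_alt n h_ heights
instance (n : Int) (h_ : Int) (heights : List Int) (out : Int) : Decidable (Spec_min_road_width n h_ heights out) := by unfold Spec_min_road_width; infer_instance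

-- ===== CLAIM =====
def Claim_equal_min_road_width : Prop := ∀ (n : Int) (h_ : Int) (heights : List Int), Dom_min_road_width n h_ heights → Spec_min_road_width n h_ heights (min_road_width n h_ heights)

-- ===== LEMMAS AND PROOFS =====

-- A's fold counts 1 per element plus 1 per element above h_
theorem foldA_eq (h_ : Int) (heights : List Int) (acc : Int) :
    heights.foldl (fun width height => if height > h_ then width + 2 else width + 1) acc
      = acc + ((heights.filter (fun height => height > h_)).length : Int) + (heights.length : Int) := by
  induction heights generalizing acc with
  | nil => simp
  | cons x xs ih =>
    simp only [List.foldl_cons, List.filter_cons, List.length_cons]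
    by_cases hx : x > h_ <;> simp [ih, hx] <;> ring

-- binary-search invariant: on a ≤-sorted list, pvBisect returns the boundary index
theorem pvBisect_spec (hs : List Int) (h_ : Int)
    (hsort : hs.Pairwise (· ≤ ·)) :
    ∀ (k : Nat) (lo hi : Int), (hi - lo).toNat = k →
      0 ≤ lo → lo ≤ hi → hi ≤ (hs.length : Int) →
      (∀ i : Nat, (i : Int) < lo → (hi' : i < hs.length) → hs[i] ≤ h_) →
      (∀ i : Nat, hi ≤ (i : Int) → (hi' : i < hs.length) → h_ < hs[i]) →
      0 ≤ pvBisect hs h_ lo hi ∧ pvBisect hs h_ lo hi ≤ (hs.length : Int) ∧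
      (∀ i : Nat, (i : Int) < pvBisect hs h_ lo hi → (hi' : i < hs.length) → hs[i] ≤ h_) ∧
      (∀ i : Nat, pvBisect hs h_ lo hi ≤ (i : Int) → (hi' : i < hs.length) → h_ < hs[i]) := by
  have hmono : ∀ (i j : Nat) (hj : j < hs.length) (hij : i ≤ j), hs[i]'(Nat.lt_of_le_of_lt hij hj) ≤ hs[j] := by
    intro i j hj hij
    rcases Nat.lt_or_ge i j with hlt | hge
    · exact (List.pairwise_iff_getElem.mp hsort) i j (by omega) hj hlt
    · have : i = j := by omega
      subst this; exact le_refl _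
  intro k
  induction k using Nat.strong_induction_on with
  | _ k ih =>
    intro lo hi hk h0 hle hlen hlow hhigh
    rw [pvBisect]
    by_cases hlt : lo < hi
    · simp only [hlt, dif_pos]
      set mid := PySem.Int.floordiv (lo + hi) 2 with hmid
      have hmide : mid = (lo + hi) / 2 := by
        rw [hmid, PySem.Int.floordiv_eq_ediv_of_pos (by norm_num)]
      have hmlo : lo ≤ mid := by rw [hmide]; omega
      have hmhi : mid < hi := by rw [hmide]; omega
      have hmrange : mid.toNat < hs.length := by omega
      have hget : PySem.List.pyGetD hs mid 0 = hs[mid.toNat] := by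
        exact PySem.List.pyGetD_eq_getElem hs 0 (by omega) (by omega)
      by_cases hcmp : PySem.List.pyGetD hs mid 0 ≤ h_
      · simp only [hcmp, if_pos]
        refine ih (hi - (mid + 1)).toNat (by omega) (mid + 1) hi rfl (by omega) (by omega) hlen ?_ hhigh
        intro i hilt hi'
        have : (i : Int) ≤ mid := by omega
        calc hs[i] ≤ hs[mid.toNat] := hmono i mid.toNat hmrange (by omega)
          _ ≤ h_ := by rw [← hget]; exact hcmp
      · simp only [hcmp, if_neg, not_false_iff]
        refine ih (mid - lo).toNat (by omega) lo mid rfl h0 (by omega) (by omega) hlow ?_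
        intro i hige hi'
        have hcmp : h_ < PySem.List.pyGetD hs mid 0 := lt_of_not_ge hcmp
        rw [hget] at hcmp
        calc h_ < hs[mid.toNat] := hcmp
          _ ≤ hs[i] := hmono mid.toNat i hi' (by omega)
    · simp only [hlt, dif_neg, not_false_iff]
      have : lo = hi := by omega
      subst this
      exact ⟨h0, hlen, hlow, hhigh⟩

-- counting from the boundary: the elements above h_ are exactly those at index ≥ r
theorem filter_length_of_split (hs : List Int) (h_ : Int) (r : Int)
    (h0 : 0 ≤ r) (hr : r ≤ (hs.length : Int))
    (hlow : ∀ i : Nat, (i : Int) < r → (hi' : i < hs.length) → hs[i] ≤ h_)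
    (hhigh : ∀ i : Nat, r ≤ (i : Int) → (hi' : i < hs.length) → h_ < hs[i]) :
    ((hs.filter (fun height => height > h_)).length : Int) = (hs.length : Int) - r := by
  have hsplit : hs = hs.take r.toNat ++ hs.drop r.toNat := (List.take_append_drop _ _).symm
  have htake : (hs.take r.toNat).filter (fun height => height > h_) = [] := by
    rw [List.filter_eq_nil_iff]
    intro x hx
    obtain ⟨i, hi, hxi⟩ := List.mem_iff_getElem.mp hx
    have hlt : i < r.toNat := by
      have := hi; simp [List.length_take] at this; omega
    have hilen : i < hs.length := by
      have := hi; simp [List.length_take] at this; omega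
    have : x = hs[i] := by rw [← hxi]; simp [List.getElem_take]
    subst this
    simp only [gt_iff_lt, decide_eq_true_eq, not_lt]
    simpa using hlow i (by omega) hilen
  have hdrop : (hs.drop r.toNat).filter (fun height => height > h_) = hs.drop r.toNat := by
    rw [List.filter_eq_self]
    intro x hx
    obtain ⟨i, hi, hxi⟩ := List.mem_iff_getElem.mp hx
    have hilen : r.toNat + i < hs.length := by
      have := hi; simp [List.length_drop] at this; omega
    have : x = hs[r.toNat + i] := by rw [← hxi]; simp [List.getElem_drop]
    subst this
    simp only [gt_iff_lt, decide_eq_true_eq]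
    exact hhigh (r.toNat + i) (by omega) hilen
  conv_lhs => rw [hsplit]
  rw [List.filter_append, htake, hdrop]
  simp [List.length_drop]
  omega

-- ===== VERDICT =====
theorem min_road_width_spec : Claim_equal_min_road_width := by
  intro n h_ heights _
  unfold Spec_min_road_width min_road_width min_road_width_alt
  set hs := PySem.List.sorted heights (fun x => x) false with hhs
  have hperm : hs.Perm heights := PySem.List.sorted_perm heights (fun x => x) false
  have hsort : hs.Pairwise (· ≤ ·) := by
    have := PySem.List.sorted_pairwise heights (fun x => x)
    simpa [hhs] using this
  have hspec := pvBisect_spec hs h_ hsort (((hs.length : Int) - 0).toNat) 0 (hs.length : Int) rfl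
    (by omega) (by omega) (by omega)
    (by intro i hi _; omega)
    (by intro i hi hi'; omega)
  obtain ⟨h0, hr, hlow, hhigh⟩ := hspec
  have hcount := filter_length_of_split hs h_ _ h0 hr hlow hhigh
  have hfiltperm : (hs.filter (fun height => height > h_)).length
      = (heights.filter (fun height => height > h_)).length :=
    (hperm.filter _).length_eq
  have hlenperm : hs.length = heights.length := hperm.length_eq
  rw [foldA_eq]
  rw [hfiltperm] at hcount
  have hl : (hs.length : Int) = (heights.length : Int) := by exact_mod_cast hlenperm
  simp only []
  omega
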